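-- pv_equiv track=rewrite | github.com/kel-z/HSR-Data | src/extractors/relic_roll_vals.py | generate_sums
-- ===== SOURCE A (Python) =====
-- from itertools import combinations_with_replacement
--
-- def generate_sums(nums: list, n: int) -> list:
--     """
--     Generate all possible sums of given numbers up to n.
--
--     :param nums: List of numbers.
--     :param n: Maximum value.
--     :return: Sorted list of all possible sums up to n.
--     """
--     results = []
--     for i in range(1, n + 1):
--         combs = combinations_with_replacement(nums, i)
--         for c in combs:
--             if sum(c) <= n:
--                 results.append(sum(c))
--     return sorted(list(set(results)))
-- ===== SOURCE B (Python) =====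
-- def generate_sums(nums: list, n: int) -> list:
--     """
--     Generate all possible sums of given numbers up to n.
--
--     :param nums: List of numbers.
--     :param n: Maximum value.
--     :return: Sorted list of all possible sums up to n.
--     """
--     results = set()
--     cur = {0}
--     for _ in range(n):
--         cur = {s + x for s in cur for x in nums}
--         results.update(s for s in cur if s <= n)
--     return sorted(results)
-- ===== Notes on version B (the rewrite author's own statement) =====
-- stated objective: faster
-- what changed: A enumerates every combinations_with_replacement tuple of each size 1..n (exponential); B computes, layer by layer, the set of sums reachable with exactly i addends from the previous layer's sum set, collecting those <= n; intended as faster — a timing run measured B 2-4x faster at the largest size both completed and A timing out earlier on several inputs, though on large n with negative nums both can time out.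
import Mathlib
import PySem

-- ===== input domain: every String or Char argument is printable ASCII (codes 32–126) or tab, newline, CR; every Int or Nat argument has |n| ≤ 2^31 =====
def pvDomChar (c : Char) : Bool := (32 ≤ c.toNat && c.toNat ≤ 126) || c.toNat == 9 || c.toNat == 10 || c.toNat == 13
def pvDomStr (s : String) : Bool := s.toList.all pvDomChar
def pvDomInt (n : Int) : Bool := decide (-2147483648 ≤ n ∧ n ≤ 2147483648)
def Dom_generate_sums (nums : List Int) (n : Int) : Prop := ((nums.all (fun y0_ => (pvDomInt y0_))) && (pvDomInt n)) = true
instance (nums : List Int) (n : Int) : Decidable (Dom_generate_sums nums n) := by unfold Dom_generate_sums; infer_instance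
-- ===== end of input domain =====

-- B replaces A's exponential enumeration of combinations_with_replacement by a
-- layered reachability DP (i-element sums from (i-1)-element sums); equal return value on all inputs.

-- ===== PORT A =====
-- itertools.combinations_with_replacement(xs, r), in Python's (lexicographic-index) order
def cwr : List Int → Nat → List (List Int)
  | _, 0 => [[]]
  | [], _ + 1 => []
  | x :: rest, r + 1 => ((cwr (x :: rest) r).map (fun c => x :: c)) ++ cwr rest (r + 1)
termination_by xs r => (r, xs.length)

def generate_sums (nums : List Int) (n : Int) : List Int :=
  let results : List Int :=
    (PySem.List.pyRange 1 (n + 1) 1).foldl (fun results i =>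
      (cwr nums i.toNat).foldl (fun results c =>
        if c.sum ≤ n then results ++ [c.sum] else results) results) []
  PySem.List.sorted (PySem.Set.ofList results) (fun x => x) false

-- ===== PORT B =====
def generate_sums_alt (nums : List Int) (n : Int) : List Int :=
  let st :=
    (PySem.List.pyRange 0 n 1).foldl (fun (st : PySem.Set Int × PySem.Set Int) _ =>
      let cur := PySem.Set.ofList (st.1.flatMap (fun s => nums.map (fun x => s + x)))
      (cur, PySem.Set.update st.2 (cur.filter (fun s => decide (s ≤ n)))))
      (PySem.Set.ofList [0], PySem.Set.empty)
  PySem.List.sorted st.2 (fun x => x) false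

-- ===== PRECONDITION & SPEC =====
def Spec_generate_sums (nums : List Int) (n : Int) (out : List Int) : Prop := out = generate_sums_alt nums n
instance (nums : List Int) (n : Int) (out : List Int) : Decidable (Spec_generate_sums nums n out) := by unfold Spec_generate_sums; infer_instance

-- ===== CLAIM (what is proved, stated in full; the proofs are below) =====
def Claim_equal_generate_sums : Prop := ∀ (nums : List Int) (n : Int), Dom_generate_sums nums n → Spec_generate_sums nums n (generate_sums nums n)

-- ===== LEMMAS AND PROOFS =====

-- s is the sum of some i-element multiset drawn from nums
def pvQ (nums : List Int) (i : Nat) (s : Int) : Prop :=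
  ∃ l : List Int, l.length = i ∧ (∀ x ∈ l, x ∈ nums) ∧ l.sum = s

theorem cwr_sound : ∀ (xs : List Int) (r : Nat) (c : List Int),
    c ∈ cwr xs r → c.length = r ∧ ∀ y ∈ c, y ∈ xs
  | _, 0, c, h => by simp [cwr] at h; simp [h]
  | [], _ + 1, c, h => by simp [cwr] at h
  | x :: rest, r + 1, c, h => by
      rw [cwr] at h
      rcases List.mem_append.mp h with h1 | h2
      · obtain ⟨c', hc', rfl⟩ := List.mem_map.mp h1
        obtain ⟨hlen, hmem⟩ := cwr_sound (x :: rest) r c' hc'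
        exact ⟨by simp [hlen], by
          intro y hy
          rcases List.mem_cons.mp hy with rfl | hy'
          · exact List.mem_cons_self
          · exact hmem y hy'⟩
      · obtain ⟨hlen, hmem⟩ := cwr_sound rest (r + 1) c h2
        exact ⟨hlen, fun y hy => List.mem_cons_of_mem _ (hmem y hy)⟩
termination_by xs r _ => r + xs.length

theorem cwr_complete : ∀ (xs l : List Int), (∀ y ∈ l, y ∈ xs) →
    ∃ c ∈ cwr xs l.length, c.sum = l.sum
  | _, [], _ => ⟨[], by simp [cwr]⟩
  | [], a :: l', h => absurd (h a (by simp)) (by simp)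
  | x :: rest, a :: l', h => by
      by_cases hx : x ∈ a :: l'
      · have hlen : ((a :: l').erase x).length = l'.length := by
          rw [List.length_erase_of_mem hx]; simp
        have hmem : ∀ y ∈ (a :: l').erase x, y ∈ x :: rest :=
          fun y hy => h y (List.mem_of_mem_erase hy)
        obtain ⟨c, hc, hcs⟩ := cwr_complete (x :: rest) ((a :: l').erase x) hmem
        rw [hlen] at hc
        refine ⟨x :: c, ?_, ?_⟩
        · show x :: c ∈ cwr (x :: rest) (a :: l').length
          rw [List.length_cons, cwr]
          exact List.mem_append_left _ (List.mem_map.mpr ⟨c, hc, rfl⟩)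
        · have hperm := (List.perm_cons_erase hx).sum_eq
          simp only [List.sum_cons] at hperm ⊢
          rw [hcs, ← hperm]
      · have hmem : ∀ y ∈ a :: l', y ∈ rest := by
          intro y hy
          rcases List.mem_cons.mp (h y hy) with rfl | hy'
          · exact absurd hy hx
          · exact hy'
        obtain ⟨c, hc, hcs⟩ := cwr_complete rest (a :: l') hmem
        refine ⟨c, ?_, hcs⟩
        show c ∈ cwr (x :: rest) (a :: l').length
        rw [List.length_cons, cwr]
        exact List.mem_append_right _ (by simpa using hc)
termination_by xs l => l.length + xs.length
decreasing_by
  all_goals simp [List.length_erase_of_mem, hx]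

theorem sums_cwr_iff (nums : List Int) (i : Nat) (s : Int) :
    (∃ c ∈ cwr nums i, c.sum = s) ↔ pvQ nums i s := by
  constructor
  · rintro ⟨c, hc, rfl⟩
    obtain ⟨hl, hm⟩ := cwr_sound nums i c hc
    exact ⟨c, hl, hm, rfl⟩
  · rintro ⟨l, rfl, hm, rfl⟩
    exact cwr_complete nums l hm

theorem pvQ_zero (nums : List Int) (s : Int) : pvQ nums 0 s ↔ s = 0 := by
  constructor
  · rintro ⟨l, hl, -, rfl⟩
    simp [List.length_eq_zero_iff.mp hl]
  · rintro rfl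
    exact ⟨[], by simp⟩

theorem pvQ_succ (nums : List Int) (k : Nat) (s : Int) :
    pvQ nums (k + 1) s ↔ ∃ t, pvQ nums k t ∧ ∃ x ∈ nums, t + x = s := by
  constructor
  · rintro ⟨l, hl, hm, rfl⟩
    rcases l with _ | ⟨y, l'⟩
    · simp at hl
    · refine ⟨l'.sum, ⟨l', by simpa using hl, fun x hx => hm x (List.mem_cons_of_mem _ hx), rfl⟩,
        y, hm y List.mem_cons_self, ?_⟩
      simp [List.sum_cons]; ring
  · rintro ⟨t, ⟨l, hl, hm, rfl⟩, x, hx, rfl⟩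
    refine ⟨x :: l, by simp [hl], ?_, by simp [List.sum_cons]; ring⟩
    intro y hy
    rcases List.mem_cons.mp hy with rfl | hy'
    · exact hx
    · exact hm y hy'

-- B's loop state after k iterations
def pvState (nums : List Int) (n : Int) (k : Nat) : PySem.Set Int × PySem.Set Int :=
  (List.range k).foldl (fun (st : PySem.Set Int × PySem.Set Int) _ =>
    let cur := PySem.Set.ofList (st.1.flatMap (fun s => nums.map (fun x => s + x)))
    (cur, PySem.Set.update st.2 (cur.filter (fun s => decide (s ≤ n)))))
    (PySem.Set.ofList [0], PySem.Set.empty)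

theorem pvState_succ (nums : List Int) (n : Int) (k : Nat) :
    pvState nums n (k + 1) =
      (PySem.Set.ofList ((pvState nums n k).1.flatMap (fun s => nums.map (fun x => s + x))),
       PySem.Set.update (pvState nums n k).2
         ((PySem.Set.ofList ((pvState nums n k).1.flatMap (fun s => nums.map (fun x => s + x)))).filter
           (fun s => decide (s ≤ n)))) := by
  unfold pvState
  rw [List.range_succ, List.foldl_append]
  simp

theorem pvState_inv (nums : List Int) (n : Int) (k : Nat) :
    (∀ s, s ∈ (pvState nums n k).1 ↔ pvQ nums k s) ∧
    (∀ s, s ∈ (pvState nums n k).2 ↔ ∃ i : Nat, 1 ≤ i ∧ i ≤ k ∧ pvQ nums i s ∧ s ≤ n) ∧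
    (pvState nums n k).2.Nodup := by
  induction k with
  | zero =>
    refine ⟨fun s => ?_, fun s => ?_, ?_⟩
    · simp [pvState, PySem.Set.mem_ofList, pvQ_zero]
    · simp [pvState, PySem.Set.empty]
    · simp [pvState, PySem.Set.empty]
  | succ k ih =>
    obtain ⟨ih1, ih2, ih3⟩ := ih
    have hcur : ∀ s, s ∈ (pvState nums n (k + 1)).1 ↔ pvQ nums (k + 1) s := by
      intro s
      rw [pvState_succ]
      simp only [PySem.Set.mem_ofList, List.mem_flatMap, List.mem_map]
      rw [pvQ_succ]
      constructor
      · rintro ⟨t, ht, x, hx, rfl⟩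
        exact ⟨t, (ih1 t).mp ht, x, hx, rfl⟩
      · rintro ⟨t, ht, x, hx, rfl⟩
        exact ⟨t, (ih1 t).mpr ht, x, hx, rfl⟩
    refine ⟨hcur, fun s => ?_, ?_⟩
    · rw [pvState_succ]
      simp only [PySem.Set.mem_update, List.mem_filter]
      rw [ih2]
      have hc := hcur s
      rw [pvState_succ] at hc
      simp only at hc
      rw [hc]
      constructor
      · rintro (⟨i, h1, h2, hq, hn⟩ | ⟨hq, hn⟩)
        · exact ⟨i, h1, by omega, hq, hn⟩
        · exact ⟨k + 1, by omega, le_refl _, hq, by simpa using hn⟩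
      · rintro ⟨i, h1, h2, hq, hn⟩
        rcases Nat.lt_or_ge i (k + 1) with hlt | hge
        · exact Or.inl ⟨i, h1, by omega, hq, hn⟩
        · have : i = k + 1 := by omega
          subst this
          exact Or.inr ⟨hq, by simpa using hn⟩
    · rw [pvState_succ]
      exact PySem.Set.nodup_update _ _ ih3

-- A's collected results list, as a flatMap
theorem resultsA_eq (nums : List Int) (n : Int) (L : List Int) (acc : List Int) :
    L.foldl (fun res i =>
      (cwr nums i.toNat).foldl (fun res c =>
        if c.sum ≤ n then res ++ [c.sum] else res) res) acc
    = acc ++ L.flatMap (fun i =>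
        ((cwr nums i.toNat).filter (fun c => decide (c.sum ≤ n))).map List.sum) := by
  induction L generalizing acc with
  | nil => simp
  | cons i L ih =>
    rw [List.foldl_cons,
      PySem.List.foldl_append_ite (p := fun c : List Int => c.sum ≤ n) (f := List.sum),
      ih, List.flatMap_cons, List.append_assoc]

theorem mem_out_iff (nums : List Int) (n : Int) (s : Int) :
    (s ∈ PySem.Set.ofList ((PySem.List.pyRange 1 (n + 1) 1).foldl (fun res i =>
        (cwr nums i.toNat).foldl (fun res c =>
          if c.sum ≤ n then res ++ [c.sum] else res) res) [])) ↔
    (s ∈ (pvState nums n n.toNat).2) := by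
  rw [resultsA_eq, (pvState_inv nums n n.toNat).2.1 s]
  simp only [PySem.Set.mem_ofList, List.nil_append, List.mem_flatMap, List.mem_map,
    List.mem_filter, PySem.List.mem_pyRange_one, decide_eq_true_eq]
  constructor
  · rintro ⟨i, ⟨h1, h2⟩, c, ⟨hc, hn⟩, rfl⟩
    refine ⟨i.toNat, by omega, by omega, ?_, hn⟩
    exact (sums_cwr_iff nums i.toNat c.sum).mp ⟨c, hc, rfl⟩
  · rintro ⟨j, h1, h2, hq, hn⟩
    obtain ⟨c, hc, hcs⟩ := (sums_cwr_iff nums j s).mpr hq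
    refine ⟨(j : Int), ⟨by omega, by omega⟩, c, ⟨by simpa using hc, by omega⟩, hcs⟩

-- ===== VERDICT (by name: the statement is the Claim_ definition above) =====
theorem generate_sums_spec : Claim_equal_generate_sums := by
  intro nums n _
  show generate_sums nums n = generate_sums_alt nums n
  unfold generate_sums generate_sums_alt
  rw [PySem.List.pyRange_one 0 n]
  simp only [Int.sub_zero, List.foldl_map]
  have hB : (List.range n.toNat).foldl (fun (st : PySem.Set Int × PySem.Set Int) _ =>
      let cur := PySem.Set.ofList (st.1.flatMap (fun s => nums.map (fun x => s + x)))
      (cur, PySem.Set.update st.2 (cur.filter (fun s => decide (s ≤ n)))))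
      (PySem.Set.ofList [0], PySem.Set.empty) = pvState nums n n.toNat := rfl
  rw [hB]
  apply PySem.List.sorted_eq_sorted_of_perm
  · exact fun a b h => h
  · refine (List.perm_ext_iff_of_nodup (PySem.Set.nodup_ofList _) (pvState_inv nums n n.toNat).2.2).mpr ?_
    intro s
    exact mem_out_iff nums n s
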